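-- pv_equiv track=rewrite | github.com/pickmoment/moontrader | moontrader/core/kiwoomf.py | make_code_info_list
-- ===== SOURCE A (Python) =====
-- def make_code_info_list(code_infos):
--     n = 170
--     code_info_list = [code_infos[i:i+n] for i in range(0, len(code_infos), n)]
--     lengths = [12, 6, 40, 3, 3, 15, 15, 15, 15, 1, 15, 10, 8, 10, 1, 1]
--     results = []
--     for code_info in code_info_list:
--         start = 0
--         row = []
--         for l in lengths:
--             row.append(code_info[start:start+l].strip())
--             start += l
--         results.append(row)
--     return results
-- ===== SOURCE B (Python) =====
-- def make_code_info_list(code_infos):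
--     # cut points = prefix sums of [12,6,40,3,3,15,15,15,15,1,15,10,8,10,1,1]
--     bounds = [0, 12, 18, 58, 61, 64, 79, 94, 109, 124, 125, 140, 150, 158, 168, 169, 170]
--     results = []
--     s = code_infos
--     while s:
--         results.append([s[a:b].strip() for a, b in zip(bounds, bounds[1:])])
--         s = s[170:]
--     return results
-- ===== Notes on version B (the rewrite author's own statement) =====
-- stated objective: alternative
-- what changed: Replaces the running-start accumulator over the field-length list with a fixed cut-point table (prefix sums) zipped into (start,end) pairs, and consumes the string 170 characters at a time with a while loop over the remaining suffix instead of indexing chunks via range(0, len, 170).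
import Mathlib
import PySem

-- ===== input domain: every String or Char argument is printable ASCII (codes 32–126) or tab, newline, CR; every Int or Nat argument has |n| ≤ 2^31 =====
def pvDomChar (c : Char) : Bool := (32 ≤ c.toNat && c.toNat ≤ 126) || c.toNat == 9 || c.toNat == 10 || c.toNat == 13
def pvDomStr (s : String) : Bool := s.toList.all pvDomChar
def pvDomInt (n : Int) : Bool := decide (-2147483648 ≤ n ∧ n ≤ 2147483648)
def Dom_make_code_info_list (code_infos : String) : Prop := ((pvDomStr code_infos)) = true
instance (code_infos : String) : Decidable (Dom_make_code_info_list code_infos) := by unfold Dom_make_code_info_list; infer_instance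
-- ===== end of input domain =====

-- B replaces A's running-start accumulator over the field-length list by a fixed table of
-- cut points (prefix sums) zipped with itself, and consumes the string 170 chars at a time
-- recursively instead of indexing with range(0, len, 170); objective: alternative decomposition.

set_option maxRecDepth 8000

-- ===== PORT A =====
def pvLengths : List Int := [12, 6, 40, 3, 3, 15, 15, 15, 15, 1, 15, 10, 8, 10, 1, 1]

def make_code_info_list (code_infos : String) : List (List String) :=
  let n : Int := 170
  let code_info_list : List String :=
    (PySem.List.pyRange 0 (PySem.Str.len code_infos) n).map
      (fun i => PySem.Str.slice code_infos (some i) (some (i + n)))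
  let results : List (List String) :=
    code_info_list.foldl
      (fun results code_info =>
        results ++
          [(pvLengths.foldl
              (fun (st : Int × List String) l =>
                (st.1 + l,
                 st.2 ++ [PySem.Str.strip (PySem.Str.slice code_info (some st.1) (some (st.1 + l)))]))
              (0, [])).2])
      []
  results

-- ===== PORT B =====
-- cut points = prefix sums of A's field lengths
def pvBounds : List Int := [0, 12, 18, 58, 61, 64, 79, 94, 109, 124, 125, 140, 150, 158, 168, 169, 170]

def make_code_info_list_alt (s : String) : List (List String) :=
  if h : s.toList.isEmpty then []
  else
    ((pvBounds.zip pvBounds.tail).map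
        (fun ab => PySem.Str.strip (PySem.Str.slice s (some ab.1) (some ab.2))))
      :: make_code_info_list_alt (PySem.Str.slice s (some 170) none)
termination_by s.toList.length
decreasing_by
  simp only [PySem.Str.toList_slice, PySem.Chars.slice_eq_listSlice]
  rw [PySem.List.slice_from _ (by norm_num)]
  rw [List.length_drop]
  simp only [List.isEmpty_iff] at h
  have := List.length_pos_of_ne_nil h
  omega

-- ===== PRECONDITION & SPEC =====
def Spec_make_code_info_list (code_infos : String) (out : List (List String)) : Prop := out = make_code_info_list_alt code_infos
instance (code_infos : String) (out : List (List String)) : Decidable (Spec_make_code_info_list code_infos out) := by unfold Spec_make_code_info_list; infer_instance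

-- ===== CLAIM (what is proved, stated in full; the proofs are below) =====
def Claim_equal_make_code_info_list : Prop := ∀ (code_infos : String), Dom_make_code_info_list code_infos → Spec_make_code_info_list code_infos (make_code_info_list code_infos)

-- ===== LEMMAS AND PROOFS =====

-- slicing a field out of the first 170-char chunk equals slicing the whole string there
lemma chunk_slice_slice (s : String) (a b : Int) (h0 : 0 ≤ a) (hab : a ≤ b) (hb : b ≤ 170) :
    PySem.Str.slice (PySem.Str.slice s (some 0) (some 170)) (some a) (some b)
      = PySem.Str.slice s (some a) (some b) := by
  apply String.toList_inj.mp
  simp only [PySem.Str.toList_slice, PySem.Chars.slice_eq_listSlice]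
  rw [PySem.List.slice_toNat _ h0 (le_trans h0 hab), PySem.List.slice_toNat _ h0 (le_trans h0 hab),
    PySem.List.slice_toNat _ (by norm_num) (by norm_num)]
  simp only [List.drop_take, List.take_take]
  congr 1
  omega

-- A's accumulator row over the first chunk equals B's boundary-pair row over the whole string
lemma row_eq (s : String) :
    (pvLengths.foldl
      (fun (st : Int × List String) l =>
        (st.1 + l,
         st.2 ++ [PySem.Str.strip (PySem.Str.slice (PySem.Str.slice s (some 0) (some (0 + 170))) (some st.1) (some (st.1 + l)))]))
      (0, [])).2
    = (pvBounds.zip pvBounds.tail).map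
        (fun ab => PySem.Str.strip (PySem.Str.slice s (some ab.1) (some ab.2))) := by
  norm_num [pvLengths, pvBounds, List.foldl]
  rw [chunk_slice_slice s 0 12 (by norm_num) (by norm_num) (by norm_num),
      chunk_slice_slice s 12 18 (by norm_num) (by norm_num) (by norm_num),
      chunk_slice_slice s 18 58 (by norm_num) (by norm_num) (by norm_num),
      chunk_slice_slice s 58 61 (by norm_num) (by norm_num) (by norm_num),
      chunk_slice_slice s 61 64 (by norm_num) (by norm_num) (by norm_num),
      chunk_slice_slice s 64 79 (by norm_num) (by norm_num) (by norm_num),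
      chunk_slice_slice s 79 94 (by norm_num) (by norm_num) (by norm_num),
      chunk_slice_slice s 94 109 (by norm_num) (by norm_num) (by norm_num),
      chunk_slice_slice s 109 124 (by norm_num) (by norm_num) (by norm_num),
      chunk_slice_slice s 124 125 (by norm_num) (by norm_num) (by norm_num),
      chunk_slice_slice s 125 140 (by norm_num) (by norm_num) (by norm_num),
      chunk_slice_slice s 140 150 (by norm_num) (by norm_num) (by norm_num),
      chunk_slice_slice s 150 158 (by norm_num) (by norm_num) (by norm_num),
      chunk_slice_slice s 158 168 (by norm_num) (by norm_num) (by norm_num),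
      chunk_slice_slice s 168 169 (by norm_num) (by norm_num) (by norm_num),
      chunk_slice_slice s 169 170 (by norm_num) (by norm_num) (by norm_num)]
  exact ⟨rfl, rfl, rfl, rfl, rfl, rfl, rfl, rfl, rfl, rfl, rfl, rfl, rfl, rfl, rfl, rfl⟩

lemma pyRange170_cons (m : Int) (hm : 0 < m) :
    PySem.List.pyRange 0 m 170 = 0 :: (PySem.List.pyRange 0 (m - 170) 170).map (· + 170) := by
  rw [PySem.List.pyRange_of_pos _ _ (by norm_num), PySem.List.pyRange_of_pos _ _ (by norm_num)]
  have hcnt : (if (0:Int) < m then ((m - 0 + 170 - 1) / 170).toNat else 0)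
      = (if (0:Int) < m - 170 then ((m - 170 - 0 + 170 - 1) / 170).toNat else 0) + 1 := by
    split_ifs <;> omega
  rw [hcnt, List.range_succ_eq_map]
  simp only [List.map_cons, List.map_map]
  refine congrArg₂ List.cons (by norm_num) ?_
  apply List.map_congr_left
  intro k _
  simp only [Function.comp_apply]
  push_cast
  ring

lemma chunk_shift (s : String) (i : Int) (hi : 0 ≤ i) :
    PySem.Str.slice s (some (i + 170)) (some (i + 170 + 170))
      = PySem.Str.slice (PySem.Str.slice s (some 170) none) (some i) (some (i + 170)) := by
  apply String.toList_inj.mp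
  simp only [PySem.Str.toList_slice, PySem.Chars.slice_eq_listSlice]
  rw [PySem.List.slice_toNat _ (by omega) (by omega), PySem.List.slice_toNat _ hi (by omega),
    PySem.List.slice_from _ (by norm_num)]
  rw [List.drop_drop]
  congr 1
  · omega
  · congr 1; omega

lemma len_drop170 (s : String) :
    PySem.Str.len (PySem.Str.slice s (some 170) none) = ((s.toList.length - 170 : Nat) : Int) := by
  rw [PySem.Str.len_eq]
  simp only [PySem.Str.toList_slice, PySem.Chars.slice_eq_listSlice]
  rw [PySem.List.slice_from _ (by norm_num)]
  rw [List.length_drop]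
  omega

lemma pyRange_sub_eq (n : Nat) :
    PySem.List.pyRange 0 ((n : Int) - 170) 170 = PySem.List.pyRange 0 ((n - 170 : Nat) : Int) 170 := by
  rw [PySem.List.pyRange_of_pos _ _ (by norm_num), PySem.List.pyRange_of_pos _ _ (by norm_num)]
  congr 2
  split_ifs <;> omega

-- A as a map over the chunk offsets
lemma A_as_map (s : String) :
    make_code_info_list s
      = (PySem.List.pyRange 0 (PySem.Str.len s) 170).map
          (fun i =>
            (pvLengths.foldl
              (fun (st : Int × List String) l =>
                (st.1 + l,
                 st.2 ++ [PySem.Str.strip (PySem.Str.slice (PySem.Str.slice s (some i) (some (i + 170))) (some st.1) (some (st.1 + l)))]))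
              (0, [])).2) := by
  simp only [make_code_info_list]
  rw [PySem.List.foldl_append_singleton_eq_map]
  simp only [List.nil_append, List.map_map]
  rfl

lemma main_eq (N : Nat) : ∀ s : String, s.toList.length ≤ N →
    make_code_info_list s = make_code_info_list_alt s := by
  induction N with
  | zero =>
    intro s hs
    have h : s.toList = [] := List.length_eq_zero_iff.mp (Nat.le_zero.mp hs)
    rw [A_as_map, make_code_info_list_alt]
    simp [h, PySem.Str.len_eq, PySem.List.pyRange_of_pos _ _ (by norm_num : (0:Int) < 170)]
  | succ N ih =>
    intro s hs
    by_cases h : s.toList.isEmpty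
    · have h' : s.toList = [] := List.isEmpty_iff.mp h
      rw [A_as_map, make_code_info_list_alt]
      simp [h', PySem.Str.len_eq, PySem.List.pyRange_of_pos _ _ (by norm_num : (0:Int) < 170)]
    · have hpos : 0 < s.toList.length := List.length_pos_of_ne_nil (by simpa [List.isEmpty_iff] using h)
      rw [A_as_map, make_code_info_list_alt]
      rw [dif_neg h]
      rw [PySem.Str.len_eq, pyRange170_cons _ (by exact_mod_cast hpos)]
      simp only [List.map_cons, List.map_map]
      refine congrArg₂ List.cons ?_ ?_
      · exact row_eq s
      · -- tail = A (s[170:]) = B (s[170:])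
        rw [← ih (PySem.Str.slice s (some 170) none)
            (by simp only [PySem.Str.toList_slice, PySem.Chars.slice_eq_listSlice]
                rw [PySem.List.slice_from _ (by norm_num), List.length_drop]
                omega)]
        rw [A_as_map, len_drop170, ← pyRange_sub_eq]
        apply List.map_congr_left
        intro i hi
        have hi0 : 0 ≤ i := by
          have := (PySem.List.mem_pyRange_iff_of_pos (by norm_num : (0:Int) < 170) i).mp hi
          omega
        simp only [Function.comp_apply]
        rw [chunk_shift s i hi0]

-- ===== VERDICT (by name: the statement is the Claim_ definition above) =====
theorem make_code_info_list_spec : Claim_equal_make_code_info_list := by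
  intro s _
  exact main_eq s.toList.length s le_rfl
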